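-- pv_equiv track=rewrite | github.com/jubeatWwW/NPhw | hw5/hw5.py | quotesHandler
-- ===== SOURCE A (Python) =====
-- def quotesHandler(quoteschk):
--     islegal = True
--     quoteclose = False
--
--     for i in range(0,len(quoteschk)):
--         if not quoteschk[i].isdigit() and not quoteschk[i].isalpha() and quoteschk[i] != '_'\
--         and quoteschk[i] != '-' and quoteschk[i] != ':' and quoteschk[i] != '.' and quoteschk[i] != '@'\
--         and quoteschk[i] != ' ' and quoteschk[i] != '\"':
--             return quoteschk, False
--         if quoteschk[i]=='\"' and quoteclose == False:
--             quoteclose = True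
--         elif quoteschk[i]==' ' and quoteclose == True:
--             quoteschk = quoteschk[:i]+'^'+quoteschk[i+1:]
--         elif quoteschk[i]=='\"' and quoteclose == True:
--             quoteclose = False
--     while quoteschk[-1:] == ' ':
--         quoteschk = quoteschk[:-1]
--     return quoteschk, True
-- ===== SOURCE B (Python) =====
-- def quotesHandler(quoteschk):
--     # one scan for the first illegal character; then a segment-based transform:
--     # split on '"', replace spaces in the odd (inside-quote) segments, rejoin.
--     if any(not (c.isdigit() or c.isalpha() or c in '_-:.@ "') for c in quoteschk):
--         return quoteschk, False
--     pieces = []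
--     inside = False
--     for part in quoteschk.split('"'):
--         pieces.append(''.join('^' if c == ' ' else c for c in part) if inside else part)
--         inside = not inside
--     return '"'.join(pieces).rstrip(' '), True
-- ===== Notes on version B (the rewrite author's own statement) =====
-- stated objective: faster
-- what changed: Replaces A's single index loop that rebuilds the whole string by slicing at every replaced quoted space (and strips trailing blanks one slice at a time) with one illegal-character scan followed by split-on-quote / replace-spaces-in-odd-segments / rejoin and a single rstrip.
-- intended difference: On inputs containing an illegal character preceded by a space inside quotes, A returns the string with those earlier quoted spaces already replaced (a leftover of its in-place mutation) together with False, while B returns the input unchanged with False, the intended value since the string is rejected. — e.g. on quotesHandler("\" !"): A returns ("\"^!", false), B returns ("\" !", false)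
import Mathlib
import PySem

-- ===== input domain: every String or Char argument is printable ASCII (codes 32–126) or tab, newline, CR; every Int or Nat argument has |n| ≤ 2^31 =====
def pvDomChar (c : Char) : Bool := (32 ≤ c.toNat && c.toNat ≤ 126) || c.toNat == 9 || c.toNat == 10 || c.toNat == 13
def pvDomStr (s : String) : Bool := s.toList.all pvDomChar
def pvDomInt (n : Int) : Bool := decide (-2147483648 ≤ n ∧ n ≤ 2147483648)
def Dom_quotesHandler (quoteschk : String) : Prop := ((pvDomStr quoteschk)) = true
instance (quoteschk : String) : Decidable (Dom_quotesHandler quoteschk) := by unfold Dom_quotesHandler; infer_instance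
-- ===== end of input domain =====

-- B replaces A's index loop (which rebuilds the string by slicing on every replaced space)
-- by one illegal-char scan plus a split-on-quote / map-odd-segments / rejoin transform;
-- on inputs with an illegal character A returns its partially transformed prefix, B the
-- untouched input (see D_ below).

-- ===== PORT A =====
-- A's character-legality test, branch for branch
def qhIllegal (c : Char) : Bool :=
  !(PySem.Chars.isdigit c) && !(PySem.Chars.isalpha c) && c != '_' && c != '-' &&
  c != ':' && c != '.' && c != '@' && c != ' ' && c != '"'

-- the for-loop over i in range(0, len(quoteschk)); fuel = number of remaining iterations
-- (i stays < s.length while fuel > 0, so the getD default is never read); the replacement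
-- quoteschk[:i] + '^' + quoteschk[i+1:] is s.take i ++ '^' :: s.drop (i+1)
def qhLoop : Nat → List Char → Bool → Nat → List Char × Bool
  | 0, s, _, _ => (s, true)
  | n + 1, s, qc, i =>
    let c := s.getD i ' '
    if qhIllegal c then (s, false)
    else if c = '"' && qc = false then qhLoop n s true (i + 1)
    else if c = ' ' && qc = true then qhLoop n (s.take i ++ '^' :: s.drop (i + 1)) qc (i + 1)
    else if c = '"' && qc = true then qhLoop n s false (i + 1)
    else qhLoop n s qc (i + 1)

-- while quoteschk[-1:] == ' ': quoteschk = quoteschk[:-1]   (s[-1:] == ' ' ↔ last char is ' ')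
def qhRstripLoop (l : List Char) : List Char :=
  if l.getLast? = some ' ' then qhRstripLoop l.dropLast else l
termination_by l.length
decreasing_by
  rename_i h
  have : l ≠ [] := by intro hl; simp [hl] at h
  have : 0 < l.length := List.length_pos_iff.mpr this
  simp [List.length_dropLast]; omega

def quotesHandler (quoteschk : String) : String × Bool :=
  match qhLoop quoteschk.toList.length quoteschk.toList false 0 with
  | (l, false) => (String.ofList l, false)
  | (l, true) => (String.ofList (qhRstripLoop l), true)

-- ===== PORT B =====
-- not (c.isdigit() or c.isalpha() or c in '_-:.@ "')
def qhBad (c : Char) : Bool :=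
  !(PySem.Chars.isdigit c || PySem.Chars.isalpha c ||
    PySem.Chars.isIn [c] ("_-:.@ \"".toList))

-- the flag loop over quoteschk.split('"'):
-- append ''.join('^' if c == ' ' else c for c in part) on odd segments, part otherwise
def qhPieces : Bool → List (List Char) → List (List Char)
  | _, [] => []
  | inside, p :: ps =>
    (if inside then p.map (fun c => if c = ' ' then '^' else c) else p) :: qhPieces (!inside) ps

-- exact port of str.rstrip(' ') (strip the single character ' ' from the right)
def qhRstripSp (l : List Char) : List Char :=
  (l.reverse.dropWhile (fun c => c = ' ')).reverse

def quotesHandler_alt (quoteschk : String) : String × Bool :=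
  let l := quoteschk.toList
  if l.any qhBad then (quoteschk, false)
  else
    (String.ofList (qhRstripSp (PySem.Chars.join ['"']
        (qhPieces false (PySem.Chars.splitOn l ['"'])))), true)

-- ===== PRECONDITION & SPEC =====
-- On inputs containing an illegal character preceded by a space inside quotes, A returns the
-- input with those earlier quoted spaces already replaced by carets (a leftover of its in-place
-- mutation) together with False, while B returns the input unchanged with False, which is the
-- intended value since the string is being rejected.
def D_quotesHandler (quoteschk : String) : Prop :=
  let l := quoteschk.toList
  let i := l.findIdx fun c => !(c.isAlphanum || c ∈ "_-:.@ \"".toList)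
  i < l.length ∧ ∃ j < i, l.getD j ' ' = ' ' ∧ (l.take j).count '"' % 2 = 1
instance (quoteschk : String) : Decidable (D_quotesHandler quoteschk) := by
  unfold D_quotesHandler; infer_instance

def Spec_quotesHandler (quoteschk : String) (out : String × Bool) : Prop :=
  ¬ D_quotesHandler quoteschk → out = quotesHandler_alt quoteschk
instance (quoteschk : String) (out : String × Bool) : Decidable (Spec_quotesHandler quoteschk out) := by
  unfold Spec_quotesHandler; infer_instance

def pvDiffWitness_quotesHandler : String := "\" !"
def pvDiffWitnessOut_quotesHandler : (String × Bool) × (String × Bool) :=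
  (("\"^!", false), ("\" !", false))

-- ===== CLAIM (what is proved, stated in full; the proofs are below) =====
def Claim_unchanged_quotesHandler : Prop := ∀ (quoteschk : String), Dom_quotesHandler quoteschk → Spec_quotesHandler quoteschk (quotesHandler quoteschk)
def Claim_changed_quotesHandler : Prop := Dom_quotesHandler (pvDiffWitness_quotesHandler) ∧ D_quotesHandler (pvDiffWitness_quotesHandler) ∧ quotesHandler (pvDiffWitness_quotesHandler) = pvDiffWitnessOut_quotesHandler.1 ∧ quotesHandler_alt (pvDiffWitness_quotesHandler) = pvDiffWitnessOut_quotesHandler.2 ∧ pvDiffWitnessOut_quotesHandler.1 ≠ pvDiffWitnessOut_quotesHandler.2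
def Claim_exact_quotesHandler : Prop := ∀ (quoteschk : String), Dom_quotesHandler quoteschk → D_quotesHandler quoteschk → quotesHandler quoteschk ≠ quotesHandler_alt quoteschk

-- ===== LEMMAS AND PROOFS =====

-- A's transformation of the character list: replace quoted spaces by '^' until the first
-- illegal character, leave everything from it on untouched
def qhTA (b : Bool) : List Char → List Char
  | [] => []
  | c :: t =>
    if qhIllegal c then c :: t
    else (if c = ' ' && b then '^' else c) :: qhTA (if c = '"' then !b else b) t

-- structural model of split('"')
def qhSplit : List Char → List (List Char)
  | [] => [[]]
  | c :: t => if c = '"' then [] :: qhSplit t else (qhSplit t).modifyHead (c :: ·)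

theorem qhLoop_eq (n : Nat) : ∀ (s : List Char) (qc : Bool) (i : Nat), i + n = s.length →
    qhLoop n s qc i = (s.take i ++ qhTA qc (s.drop i), (s.drop i).all (fun c => !qhIllegal c)) := by
  induction n with
  | zero =>
    intro s qc i h
    simp at h
    simp [qhLoop, qhTA, List.drop_eq_nil_of_le (le_of_eq h.symm), List.take_of_length_le (le_of_eq h.symm)]
  | succ n ih =>
    intro s qc i h
    have hi : i < s.length := by omega
    have hget : s.getD i ' ' = s[i] := List.getD_eq_getElem s ' ' hi
    have hdrop : s.drop i = s[i] :: s.drop (i + 1) := List.drop_eq_getElem_cons hi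
    have htake : s.take (i + 1) = s.take i ++ [s[i]] := by
      rw [List.take_add_one]; simp [List.getElem?_eq_getElem hi]
    simp only [qhLoop, hget]
    by_cases hill : qhIllegal s[i] = true
    · rw [if_pos hill, hdrop]
      simp only [qhTA, if_pos hill, List.all_cons, hill, Bool.not_true, Bool.false_and, if_true]
      rw [← hdrop, List.take_append_drop]
    · have hill' : qhIllegal s[i] = false := by simpa using hill
      rw [if_neg hill]
      by_cases hq : s[i] = '"'
      · cases qc with
        | false =>
          rw [if_pos (by simp [hq]), ih s true (i + 1) (by omega), hdrop]
          simp only [qhTA, hill', htake, hq, List.all_cons, Bool.not_false, Bool.true_and]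
          simp [show qhIllegal '"' = false from by decide]
        | true =>
          rw [if_neg (by simp), if_neg (by simp [hq]), if_pos (by simp [hq]),
            ih s false (i + 1) (by omega), hdrop]
          simp only [qhTA, hill', htake, hq, List.all_cons, Bool.not_false, Bool.true_and]
          simp [show qhIllegal '"' = false from by decide]
      · by_cases hsp : s[i] = ' ' ∧ qc = true
        · obtain ⟨hsp1, rfl⟩ := hsp
          rw [if_neg (by simp [hq]), if_pos (by simp [hsp1])]
          have hlen : (s.take i ++ '^' :: s.drop (i + 1)).length = s.length := by
            simp [List.length_take]; omega
          rw [ih _ true (i + 1) (by rw [hlen]; omega)]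
          have h1 : (s.take i ++ '^' :: s.drop (i + 1)).take (i + 1) = s.take i ++ ['^'] := by
            rw [List.take_append]
            simp [List.length_take, min_eq_left (le_of_lt hi)]
          have h2 : (s.take i ++ '^' :: s.drop (i + 1)).drop (i + 1) = s.drop (i + 1) := by
            rw [List.drop_append]
            simp [List.length_take, min_eq_left (le_of_lt hi)]
          rw [h1, h2, hdrop]
          simp only [qhTA, hill', htake, hq, hsp1, List.all_cons, Bool.not_false, Bool.true_and]
          simp [show qhIllegal ' ' = false from by decide, hq]
        · cases qc with
          | false =>
            rw [if_neg (by simp [hq]), if_neg (by simp), if_neg (by simp [hq]),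
              ih s false (i + 1) (by omega), hdrop]
            simp only [qhTA, hill', htake, hq, List.all_cons, Bool.not_false, Bool.true_and]
            simp [hill', hq]
            rw [htake, List.append_assoc]; rfl
          | true =>
            have hns : s[i] ≠ ' ' := fun hh => hsp ⟨hh, rfl⟩
            rw [if_neg (by simp), if_neg (by simp [hns]), if_neg (by simp [hq]),
              ih s true (i + 1) (by omega), hdrop]
            simp only [qhTA, hill', htake, hq, hns, List.all_cons, Bool.not_false, Bool.true_and]
            simp [hill', hq, hns]
            rw [htake, List.append_assoc]; rfl

theorem go_eq (fuel : Nat) : ∀ (l cur : List Char) (acc : List (List Char)), l.length ≤ fuel →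
    PySem.Chars.splitOn.go ['"'] fuel l cur acc =
      acc.reverse ++ (qhSplit l).modifyHead (cur.reverse ++ ·) := by
  induction fuel with
  | zero =>
    intro l cur acc h
    have : l = [] := by cases l <;> simp_all
    subst this
    simp [PySem.Chars.splitOn.go, qhSplit]
  | succ n ih =>
    intro l cur acc h
    cases l with
    | nil => simp [PySem.Chars.splitOn.go, qhSplit]
    | cons c rest =>
      by_cases hc : c = '"'
      · subst hc
        have hp : List.isPrefixOf ['"'] ('"' :: rest) = true := by simp [List.isPrefixOf]
        rw [PySem.Chars.splitOn.go, if_pos hp]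
        simp only [List.length_singleton, List.drop_one, List.tail_cons]
        rw [ih rest [] (cur.reverse :: acc) (by simpa using h)]
        simp [qhSplit]
        cases qhSplit rest <;> simp
      · have hp : List.isPrefixOf ['"'] (c :: rest) = false := by
          simp [List.isPrefixOf]; exact fun h => absurd h.symm hc
        rw [PySem.Chars.splitOn.go, if_neg (by simp [hp])]
        rw [ih rest (c :: cur) acc (by simpa using Nat.le_of_succ_le_succ h)]
        simp only [qhSplit, if_neg hc, List.modifyHead_modifyHead]
        congr 1
        cases qhSplit rest <;> simp

theorem qhSplit_eq (l : List Char) : PySem.Chars.splitOn l ['"'] = qhSplit l := by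
  rw [PySem.Chars.splitOn, go_eq (l.length + 1) l [] [] (by omega)]
  cases qhSplit l <;> simp

theorem qhSplit_ne_nil (l : List Char) : qhSplit l ≠ [] := by
  induction l with
  | nil => simp [qhSplit]
  | cons c t ih =>
    simp only [qhSplit]
    split
    · simp
    · cases h : qhSplit t with
      | nil => exact absurd h ih
      | cons p ps => simp

theorem qhPieces_ne_nil (b : Bool) (ps : List (List Char)) (h : ps ≠ []) : qhPieces b ps ≠ [] := by
  cases ps <;> simp_all [qhPieces]

theorem join_cons' (x : Char) (y : List Char) (rest : List (List Char)) :
    PySem.Chars.join ['"'] ((x :: y) :: rest) = x :: PySem.Chars.join ['"'] (y :: rest) := by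
  cases rest with
  | nil => simp [PySem.Chars.join, List.intercalate]
  | cons r rs => rw [PySem.Chars.join_cons_cons, PySem.Chars.join_cons_cons]; simp

theorem join_pieces_eq (l : List Char) : ∀ (b : Bool), l.all (fun c => !qhIllegal c) →
    PySem.Chars.join ['"'] (qhPieces b (qhSplit l)) = qhTA b l := by
  induction l with
  | nil => intro b _; simp [qhSplit, qhPieces, qhTA, PySem.Chars.join, List.intercalate]
  | cons c t ih =>
    intro b hall
    have hc : qhIllegal c = false := by simp at hall; simpa using hall.1
    have ht : t.all (fun c => !qhIllegal c) := by simp_all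
    by_cases hq : c = '"'
    · subst hq
      have hne := qhPieces_ne_nil (!b) _ (qhSplit_ne_nil t)
      rw [show qhSplit ('"' :: t) = [] :: qhSplit t by simp [qhSplit]]
      rw [show qhPieces b ([] :: qhSplit t) = [] :: qhPieces (!b) (qhSplit t) by
        cases b <;> simp [qhPieces]]
      obtain ⟨r, rs, hr⟩ := List.exists_cons_of_ne_nil hne
      rw [hr, PySem.Chars.join_cons_cons, ← hr, ih (!b) ht]
      have : qhIllegal '"' = false := by decide
      simp [qhTA, this]
    · obtain ⟨p, ps, hsp⟩ := List.exists_cons_of_ne_nil (qhSplit_ne_nil t)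
      rw [show qhSplit (c :: t) = (c :: p) :: ps by simp [qhSplit, hq, hsp]]
      rw [show qhPieces b ((c :: p) :: ps) =
          ((if c = ' ' && b then '^' else c) ::
            (if b then p.map (fun c => if c = ' ' then '^' else c) else p)) :: qhPieces (!b) ps by
        cases b <;> simp [qhPieces]]
      rw [join_cons']
      rw [show ((if b then p.map (fun c => if c = ' ' then '^' else c) else p) :: qhPieces (!b) ps)
          = qhPieces b (p :: ps) by cases b <;> simp [qhPieces]]
      rw [← hsp, ih b ht]
      simp [qhTA, hc, hq]

theorem rstrip_eq (l : List Char) : qhRstripLoop l = qhRstripSp l := by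
  fun_induction qhRstripLoop l with
  | case1 l h ih =>
    rw [ih]
    rcases List.eq_nil_or_concat l with rfl | ⟨t, a, rfl⟩
    · simp at h
    · have ha : a = ' ' := by simpa using h
      simp [qhRstripSp, ha]
  | case2 l h =>
    rcases List.eq_nil_or_concat l with rfl | ⟨t, a, rfl⟩
    · simp [qhRstripSp]
    · have ha : ¬ (a = ' ') := by simpa using h
      simp [qhRstripSp, ha]

theorem bad_eq (c : Char) : qhBad c = qhIllegal c := by
  have h : PySem.Chars.isIn [c] ("_-:.@ \"".toList) = (c = '_' || c = '-' || c = ':' || c = '.' || c = '@' || c = ' ' || c = '"') := by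
    rw [Bool.eq_iff_iff, PySem.Chars.isIn_iff_infix, List.singleton_infix_iff]
    simp; tauto
  simp only [qhBad, qhIllegal, h]
  cases PySem.Chars.isdigit c <;> cases PySem.Chars.isalpha c <;>
    by_cases h1 : c = '_' <;> by_cases h2 : c = '-' <;> by_cases h3 : c = ':' <;>
    by_cases h4 : c = '.' <;> by_cases h5 : c = '@' <;> by_cases h6 : c = ' ' <;>
    by_cases h7 : c = '"' <;> simp_all

theorem alnum_eq (c : Char) : (PySem.Chars.isdigit c || PySem.Chars.isalpha c) = c.isAlphanum := by
  rw [Char.isAlphanum, Bool.or_comm]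
  congr 1
  rw [Bool.eq_iff_iff]
  simp [PySem.Chars.isalpha, PySem.Chars.isupper, PySem.Chars.islower,
    Char.isAlpha, Char.isUpper, Char.isLower, Char.le_def]

theorem bad2_eq (c : Char) :
    (!(c.isAlphanum || c ∈ "_-:.@ \"".toList)) = qhIllegal c := by
  rw [show ("_-:.@ \"".toList) = ['_', '-', ':', '.', '@', ' ', '"'] from rfl, ← alnum_eq]
  simp only [qhIllegal]
  cases PySem.Chars.isdigit c <;> cases PySem.Chars.isalpha c <;>
    by_cases h1 : c = '_' <;> by_cases h2 : c = '-' <;> by_cases h3 : c = ':' <;>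
    by_cases h4 : c = '.' <;> by_cases h5 : c = '@' <;> by_cases h6 : c = ' ' <;>
    by_cases h7 : c = '"' <;> simp_all

theorem qhTA_eq_self (l : List Char) : ∀ (b : Bool),
    qhTA b l = l ↔
      ¬ ∃ j < l.findIdx qhIllegal, l.getD j ' ' = ' ' ∧
        ((l.take j).count '"' + (if b then 1 else 0)) % 2 = 1 := by
  induction l with
  | nil => intro b; simp [qhTA]
  | cons c t ih =>
    intro b
    by_cases hill : qhIllegal c = true
    · simp [qhTA, hill, List.findIdx_cons]
    · have hill' : qhIllegal c = false := by simpa using hill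
      rw [List.findIdx_cons, hill']
      simp only [cond_false]
      constructor
      · intro heq
        rintro ⟨j, hj, hsp, hpar⟩
        cases j with
        | zero =>
          -- head is a replaced space: contradiction with heq
          simp at hsp hpar
          have hb : b = true := by rcases b <;> simp_all
          rw [qhTA, if_neg hill] at heq
          rw [hsp, hb] at heq
          simp at heq
        | succ j =>
          have hj' : j < t.findIdx qhIllegal := by omega
          -- from heq, the head char is unchanged and tail transform is identity
          rw [qhTA, if_neg hill] at heq
          have hc2 : (if c = ' ' && b then '^' else c) = c ∧ qhTA (if c = '"' then !b else b) t = t :=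
            ⟨(List.cons.inj heq).1, (List.cons.inj heq).2⟩
          have := (ih (if c = '"' then !b else b)).mp hc2.2
          apply this
          refine ⟨j, hj', by simpa using hsp, ?_⟩
          rw [List.take_succ_cons] at hpar
          by_cases hq : c = '"'
          · subst hq
            simp [List.count_cons] at hpar ⊢
            rcases b <;> simp_all <;> omega
          · simp [List.count_cons, hq] at hpar ⊢
            omega
      · intro hno
        rw [qhTA, if_neg hill]
        have hhead : (if c = ' ' && b then '^' else c) = c := by
          by_cases hcb : c = ' ' ∧ b = true
          · exfalso
            exact hno ⟨0, by omega, by simp [hcb.1], by simp [hcb.2]⟩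
          · rcases b <;> simp_all
        rw [hhead]
        congr 1
        rw [ih (if c = '"' then !b else b)]
        rintro ⟨j, hj, hsp, hpar⟩
        apply hno
        refine ⟨j + 1, by omega, by simpa using hsp, ?_⟩
        rw [List.take_succ_cons]
        by_cases hq : c = '"'
        · subst hq
          simp [List.count_cons] at hpar ⊢
          rcases b <;> simp_all <;> omega
        · simp [List.count_cons, hq] at hpar ⊢
          omega

theorem findIdx_bad2 (l : List Char) :
    l.findIdx (fun c => !(c.isAlphanum || c ∈ "_-:.@ \"".toList)) = l.findIdx qhIllegal := by
  congr 1; funext c; exact bad2_eq c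

theorem quotesHandler_eval (q : String) :
    quotesHandler q =
      if q.toList.all (fun c => !qhIllegal c) then
        (String.ofList (qhRstripLoop (qhTA false q.toList)), true)
      else (String.ofList (qhTA false q.toList), false) := by
  unfold quotesHandler
  rw [qhLoop_eq q.toList.length q.toList false 0 (by simp)]
  simp only [List.take_zero, List.drop_zero, List.nil_append]
  cases q.toList.all (fun c => !qhIllegal c) <;> simp

theorem D_iff (q : String) :
    D_quotesHandler q ↔
      (¬ q.toList.all (fun c => !qhIllegal c) = true) ∧
      ∃ j < q.toList.findIdx qhIllegal, q.toList.getD j ' ' = ' ' ∧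
        ((q.toList.take j).count '"' + (if false then 1 else 0)) % 2 = 1 := by
  unfold D_quotesHandler
  simp only [findIdx_bad2, if_false, Nat.add_zero]
  constructor
  · rintro ⟨h1, h2⟩
    refine ⟨?_, by simpa using h2⟩
    intro hall
    have hgt := List.findIdx_getElem (p := qhIllegal) (xs := q.toList) (w := h1)
    have := (List.all_eq_true.mp hall) _ (List.getElem_mem h1)
    simp_all
  · rintro ⟨h1, h2⟩
    refine ⟨?_, by simpa using h2⟩
    have hfalse : (q.toList.all fun c => !qhIllegal c) = false := by
      cases h : (q.toList.all fun c => !qhIllegal c)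
      · rfl
      · exact absurd h h1
    obtain ⟨x, hx, hpx⟩ := List.all_eq_false.mp hfalse
    exact List.findIdx_lt_length_of_exists ⟨x, hx, by simpa using hpx⟩

theorem alt_eval (q : String) :
    quotesHandler_alt q =
      if q.toList.all (fun c => !qhIllegal c) then
        (String.ofList (qhRstripSp (PySem.Chars.join ['"']
          (qhPieces false (PySem.Chars.splitOn q.toList ['"'])))), true)
      else (q, false) := by
  have hany : q.toList.any qhBad = !(q.toList.all fun c => !qhIllegal c) := by
    rw [List.any_eq_not_all_not]
    congr 1; congr 1; funext c; rw [bad_eq]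
  simp only [quotesHandler_alt, hany]
  cases q.toList.all (fun c => !qhIllegal c) <;> simp

-- ===== VERDICT (by name: the statement is the Claim_ definition above) =====
theorem quotesHandler_spec : Claim_unchanged_quotesHandler := by
  intro q _ hD
  rw [quotesHandler_eval, alt_eval]
  cases hall : q.toList.all (fun c => !qhIllegal c) with
  | true =>
    rw [qhSplit_eq, join_pieces_eq _ false hall, rstrip_eq]
    simp
  | false =>
    simp only [Bool.false_eq_true, if_false]
    have hne : qhTA false q.toList = q.toList := by
      rw [qhTA_eq_self]
      intro hex
      exact hD ((D_iff q).mpr ⟨by simp [hall], by simpa using hex⟩)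
    rw [hne, String.ofList_toList]

theorem quotesHandler_changed : Claim_changed_quotesHandler := by
  unfold Claim_changed_quotesHandler; decide

theorem quotesHandler_tight : Claim_exact_quotesHandler := by
  intro q _ hd
  rcases (D_iff q).mp hd with ⟨hall, hex⟩
  have hall' : q.toList.all (fun c => !qhIllegal c) = false := by
    cases h : q.toList.all (fun c => !qhIllegal c)
    · rfl
    · exact absurd h hall
  rw [quotesHandler_eval, alt_eval, hall']
  simp only [Bool.false_eq_true, if_false]
  intro hcontra
  have h1 : String.ofList (qhTA false q.toList) = q := (Prod.ext_iff.mp hcontra).1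
  have h2 : qhTA false q.toList = q.toList := by
    have := congrArg String.toList h1
    simpa [String.toList_ofList] using this
  exact ((qhTA_eq_self q.toList false).mp h2) (by simpa using hex)
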